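-- pv_equiv track=rewrite | github.com/G-Gromko/GG_praca_inzynierska | code/utils.py | make_krn_from_pred
-- ===== SOURCE A (Python) =====
-- def remove_wrong_whitespace(pred):
--
--     i = 1
--     while i < len(pred):
--         if pred[i] == pred[i-1] and pred[i] == '<b>':
--             pred.pop(i)
--             i -= 1
--         elif pred[i] == pred[i-1] and pred[i] == '<t>':
--             pred.pop(i)
--             i -= 1
--         elif pred[i] == pred[i-1] and pred[i] == '<s>':
--             pred.pop(i)
--             i -= 1
--         elif pred[i] == '<b>' and pred[i-1] == '<t>':
--             pred.insert(i, '.')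
--             i += 1
--         elif pred[i-1] == '<b>' and pred[i] == '<t>':
--             pred.pop(i)
--             i -= 1
--         elif pred[i-1] == '<b>' and pred[i] == '<s>':
--             pred.pop(i)
--             i -= 1
--         elif pred[i-1] == '<s>' and pred[i] == '<t>':
--             pred.pop(i-1)
--             i -= 1
--         elif pred[i-1] == '<s>' and pred[i] == '<b>':
--             pred.pop(i-1)
--             i -= 1
--         i += 1
--
--     return pred
--
-- def make_krn_from_pred(pred):
--
--     pred = remove_wrong_whitespace(pred)
--     ret_str = ""
--
--     for p in pred:
--         if p == '<t>':
--             p = "\t"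
--         elif p == "<b>":
--             p = "\n"
--         elif p == "<s>":
--             p = " "
--
--         ret_str += p
--
--     return ret_str
-- ===== SOURCE B (Python) =====
-- # Single left-to-right pass building the output list once (A repeatedly
-- # pops/inserts in the middle of the list, which is quadratic).
-- # Note: A mutates its argument in place; B does not -- the equivalence
-- # claimed is about the return value only.
--
-- _WS = ('<b>', '<t>', '<s>')
--
--
-- def _step(out, t):
--     """Append token t to out, applying the local whitespace rewrite rules."""
--     if not out:
--         out.append(t)
--         return
--     top = out[-1]
--     if t in _WS and t == top:
--         return  # collapse duplicated whitespace token
--     if top == '<t>' and t == '<b>':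
--         out.append('.')
--         out.append(t)
--         return
--     if top == '<b>' and t in ('<t>', '<s>'):
--         return  # drop tab/space right after a line break
--     if top == '<s>' and t in ('<t>', '<b>'):
--         out.pop()  # space before tab/break loses
--         out.append(t)
--         return
--     out.append(t)
--
--
-- def make_krn_from_pred(pred):
--     out = []
--     for t in pred:
--         _step(out, t)
--     conv = {'<t>': '\t', '<b>': '\n', '<s>': ' '}
--     return ''.join(conv.get(t, t) for t in out)
-- ===== Notes on version B (the rewrite author's own statement) =====
-- stated objective: faster
-- what changed: Replaces A's index-walking loop that pops/inserts in the middle of the list (each O(n)) by a single left-to-right pass that applies the same local rewrite rules while appending to an output list, then joins once.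
import Mathlib
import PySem

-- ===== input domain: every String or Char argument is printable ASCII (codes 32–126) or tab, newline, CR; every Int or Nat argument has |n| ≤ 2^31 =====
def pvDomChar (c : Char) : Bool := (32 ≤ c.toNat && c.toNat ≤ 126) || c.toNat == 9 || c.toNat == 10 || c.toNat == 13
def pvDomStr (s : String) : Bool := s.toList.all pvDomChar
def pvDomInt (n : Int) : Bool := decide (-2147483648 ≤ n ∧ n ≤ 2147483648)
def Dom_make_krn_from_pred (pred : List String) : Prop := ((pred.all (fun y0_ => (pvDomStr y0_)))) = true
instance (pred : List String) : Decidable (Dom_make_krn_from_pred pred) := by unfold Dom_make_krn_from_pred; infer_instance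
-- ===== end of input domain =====

-- B replaces A's in-place pop/insert index loop (quadratic) by one linear pass
-- appending to an output list with the same local rewrite rules.
-- A mutates its Python argument in place; the equivalence is about the return value.

-- ===== PORT A =====
-- termination measure facts for the while loop (cited by name in decreasing_by)
theorem pvDecEraseI (l : List String) (i : Nat) (h : i < l.length) :
    3 * (l.eraseIdx i).length - 2 * i < 3 * l.length - 2 * i := by
  rw [List.length_eraseIdx_of_lt h]; omega

theorem pvDecErasePrev (l : List String) (i : Nat) (h : i < l.length) :
    3 * (l.eraseIdx (i - 1)).length - 2 * i < 3 * l.length - 2 * i := by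
  rw [List.length_eraseIdx_of_lt (by omega)]; omega

theorem pvDecInsert (l : List String) (i : Nat) (x : String) (h : i < l.length) :
    3 * (l.insertIdx i x).length - 2 * (i + 2) < 3 * l.length - 2 * i := by
  rw [List.length_insertIdx_of_le_length (by omega)]; omega

theorem pvDecStep (l : List String) (i : Nat) (h : i < l.length) :
    3 * l.length - 2 * (i + 1) < 3 * l.length - 2 * i := by
  omega

-- while loop of remove_wrong_whitespace; i ≥ 1 on entry, net effect of each
-- branch (pop/insert plus the i adjustments) transliterated directly.
def rwwLoop (pred : List String) (i : Nat) : List String :=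
  if h : i < pred.length then
    let c := pred.getD i ""          -- pred[i]  (in range: i < len)
    let p := pred.getD (i-1) ""      -- pred[i-1] (in range: 1 ≤ i)
    if c = p ∧ c = "<b>" then rwwLoop (pred.eraseIdx i) i
    else if c = p ∧ c = "<t>" then rwwLoop (pred.eraseIdx i) i
    else if c = p ∧ c = "<s>" then rwwLoop (pred.eraseIdx i) i
    else if c = "<b>" ∧ p = "<t>" then rwwLoop (pred.insertIdx i ".") (i+2)
    else if p = "<b>" ∧ c = "<t>" then rwwLoop (pred.eraseIdx i) i
    else if p = "<b>" ∧ c = "<s>" then rwwLoop (pred.eraseIdx i) i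
    else if p = "<s>" ∧ c = "<t>" then rwwLoop (pred.eraseIdx (i-1)) i
    else if p = "<s>" ∧ c = "<b>" then rwwLoop (pred.eraseIdx (i-1)) i
    else rwwLoop pred (i+1)
  else pred
termination_by 3 * pred.length - 2 * i
decreasing_by
  · exact pvDecEraseI pred i h
  · exact pvDecEraseI pred i h
  · exact pvDecEraseI pred i h
  · exact pvDecInsert pred i "." h
  · exact pvDecEraseI pred i h
  · exact pvDecEraseI pred i h
  · exact pvDecErasePrev pred i h
  · exact pvDecErasePrev pred i h
  · exact pvDecStep pred i h

def make_krn_from_pred (pred : List String) : String :=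
  let pred := rwwLoop pred 1
  pred.foldl (fun acc p =>
    acc ++ (if p = "<t>" then "\t" else if p = "<b>" then "\n"
            else if p = "<s>" then " " else p)) ""

-- ===== PORT B =====
-- _step of Source B; the stack `out` is kept reversed (head = Python's out[-1]).
def stepB (out : List String) (t : String) : List String :=
  match out with
  | [] => [t]
  | top :: rest =>
    if (t = "<b>" ∨ t = "<t>" ∨ t = "<s>") ∧ t = top then out
    else if top = "<t>" ∧ t = "<b>" then t :: "." :: out
    else if top = "<b>" ∧ (t = "<t>" ∨ t = "<s>") then out
    else if top = "<s>" ∧ (t = "<t>" ∨ t = "<b>") then t :: rest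
    else t :: out

def make_krn_from_pred_alt (pred : List String) : String :=
  let out := pred.foldl stepB []
  String.join (out.reverse.map (fun t =>
    if t = "<t>" then "\t" else if t = "<b>" then "\n"
    else if t = "<s>" then " " else t))

-- ===== PRECONDITION & SPEC =====
def Spec_make_krn_from_pred (pred : List String) (out : String) : Prop := out = make_krn_from_pred_alt pred
instance (pred : List String) (out : String) : Decidable (Spec_make_krn_from_pred pred out) := by unfold Spec_make_krn_from_pred; infer_instance

-- ===== CLAIM (what is proved, stated in full; the proofs are below) =====
def Claim_equal_make_krn_from_pred : Prop := ∀ (pred : List String), Dom_make_krn_from_pred pred → Spec_make_krn_from_pred pred (make_krn_from_pred pred)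

-- ===== LEMMAS AND PROOFS =====

-- positional helpers about the list surgery A performs around index |rest|+1
theorem pvGetD0 (rest : List String) (x : String) (B : List String) :
    (rest.reverse ++ x :: B).getD rest.length "" = x := by
  simp

theorem pvGetD1 (rest : List String) (x y : String) (B : List String) :
    (rest.reverse ++ x :: y :: B).getD (rest.length + 1) "" = y := by
  simp

theorem pvErase1 (rest : List String) (x y : String) (B : List String) :
    (rest.reverse ++ x :: y :: B).eraseIdx (rest.length + 1) = rest.reverse ++ x :: B := by
  have : ∀ (A : List String), (A ++ x :: y :: B).eraseIdx (A.length + 1) = A ++ x :: B := by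
    intro A
    induction A with
    | nil => simp
    | cons a A ih => simpa [List.eraseIdx] using ih
  simpa using this rest.reverse

theorem pvErase0 (rest : List String) (x : String) (B : List String) :
    (rest.reverse ++ x :: B).eraseIdx rest.length = rest.reverse ++ B := by
  have : ∀ (A : List String), (A ++ x :: B).eraseIdx A.length = A ++ B := by
    intro A
    induction A with
    | nil => simp
    | cons a A ih => simpa [List.eraseIdx] using ih
  simpa using this rest.reverse

theorem pvInsert1 (rest : List String) (x y : String) (B : List String) :
    (rest.reverse ++ x :: y :: B).insertIdx (rest.length + 1) "." = rest.reverse ++ x :: "." :: y :: B := by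
  have : ∀ (A : List String), (A ++ x :: y :: B).insertIdx (A.length + 1) "." = A ++ x :: "." :: y :: B := by
    intro A
    induction A with
    | nil => simp [List.insertIdx]
    | cons a A ih => simpa [List.insertIdx] using ih
  simpa using this rest.reverse

-- main simulation: the while loop on (s.reverse ++ L) at index |s| computes
-- the reversed fold of stepB over L starting from stack s.
theorem rwwLoop_eq_foldl (L : List String) : ∀ (s : List String), s ≠ [] →
    rwwLoop (s.reverse ++ L) s.length = (L.foldl stepB s).reverse := by
  induction L with
  | nil =>
    intro s _
    rw [rwwLoop]
    simp
  | cons c L' ih =>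
    intro s hs
    cases s with
    | nil => exact absurd rfl hs
    | cons top rest =>
      rw [rwwLoop]
      rw [dif_pos (by simp)]
      simp only [List.reverse_cons, List.append_assoc, List.singleton_append,
        List.length_cons, Nat.add_sub_cancel, pvGetD0, pvGetD1, List.foldl_cons]
      split_ifs with h1 h2 h3 h4 h5 h6 h7 h8
      · obtain ⟨e1, e2⟩ := h1; subst e2; subst e1
        rw [pvErase1]
        simpa [stepB] using ih ("<b>" :: rest) (by simp)
      · obtain ⟨e1, e2⟩ := h2; subst e2; subst e1
        rw [pvErase1]
        simpa [stepB] using ih ("<t>" :: rest) (by simp)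
      · obtain ⟨e1, e2⟩ := h3; subst e2; subst e1
        rw [pvErase1]
        simpa [stepB] using ih ("<s>" :: rest) (by simp)
      · obtain ⟨e1, e2⟩ := h4; subst e1; subst e2
        rw [pvInsert1]
        simpa [stepB] using ih ("<b>" :: "." :: "<t>" :: rest) (by simp)
      · obtain ⟨e1, e2⟩ := h5; subst e1; subst e2
        rw [pvErase1]
        simpa [stepB] using ih ("<b>" :: rest) (by simp)
      · obtain ⟨e1, e2⟩ := h6; subst e1; subst e2
        rw [pvErase1]
        simpa [stepB] using ih ("<b>" :: rest) (by simp)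
      · obtain ⟨e1, e2⟩ := h7; subst e1; subst e2
        rw [pvErase0]
        simpa [stepB] using ih ("<t>" :: rest) (by simp)
      · obtain ⟨e1, e2⟩ := h8; subst e1; subst e2
        rw [pvErase0]
        simpa [stepB] using ih ("<b>" :: rest) (by simp)
      · have hstep : stepB (top :: rest) c = c :: top :: rest := by
          simp only [stepB]
          split_ifs with g1 g2 g3 g4
          · rcases g1.1 with e | e | e
            · exact absurd ⟨g1.2, e⟩ h1
            · exact absurd ⟨g1.2, e⟩ h2
            · exact absurd ⟨g1.2, e⟩ h3
          · exact absurd ⟨g2.2, g2.1⟩ h4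
          · rcases g3.2 with e | e
            · exact absurd ⟨g3.1, e⟩ h5
            · exact absurd ⟨g3.1, e⟩ h6
          · rcases g4.2 with e | e
            · exact absurd ⟨g4.1, e⟩ h7
            · exact absurd ⟨g4.1, e⟩ h8
          · rfl
        rw [hstep]
        simpa using ih (c :: top :: rest) (by simp)

theorem pvJoinFold (f : String → String) (l : List String) : ∀ (acc : String),
    l.foldl (fun a p => a ++ f p) acc = acc ++ String.join (l.map f) := by
  induction l with
  | nil =>
    intro acc
    simp [String.join_eq]
  | cons x t ih =>
    intro acc
    have jc : String.join (f x :: t.map f) = f x ++ String.join (t.map f) := by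
      simp [String.join_eq]
    simp only [List.foldl_cons, List.map_cons, jc]
    rw [ih, String.append_assoc]

theorem make_krn_main (pred : List String) :
    make_krn_from_pred pred = make_krn_from_pred_alt pred := by
  cases pred with
  | nil =>
    simp only [make_krn_from_pred, make_krn_from_pred_alt]
    rw [rwwLoop]
    simp [String.join_eq]
  | cons h t =>
    simp only [make_krn_from_pred, make_krn_from_pred_alt]
    have e : rwwLoop (h :: t) 1 = (t.foldl stepB [h]).reverse := by
      simpa using rwwLoop_eq_foldl t [h] (by simp)
    rw [e]
    have e2 : (h :: t).foldl stepB [] = t.foldl stepB [h] := rfl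
    rw [e2, pvJoinFold]
    simp

-- ===== VERDICT (by name: the statement is the Claim_ definition above) =====
theorem make_krn_from_pred_spec : Claim_equal_make_krn_from_pred := by
  intro pred _
  unfold Spec_make_krn_from_pred
  exact make_krn_main pred
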